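-- pv_equiv track=rewrite | github.com/gdutthu/leetcode | chap3. 数与位/492. 构造矩形/constructRectangle.py | constructRectangle
-- ===== SOURCE A (Python) =====
-- from typing import List
--
-- import math
--
-- def constructRectangle(area: int) -> List[int]:
--     # 基本思路：其实就是求最大因数
--     if area<=2:
--         res=[1,area]
--
--     res=[area,1]
--     for width in range(2,int(math.sqrt(area))+1):
--         if area % width==0:
--             l=max(area//width,width)
--             w=min(area//width,width)
--             res=[l,w]
--     return res
-- ===== SOURCE B (Python) =====
-- from typing import List
--
-- import math
--
-- def constructRectangle(area: int) -> List[int]: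
--     # Prime-factorize area by trial division, enumerate ALL divisors from the
--     # factorization, and pick the largest divisor not exceeding isqrt(area).
--     if area == 0:
--         return [0, 1]
--     n = area
--     factors = []
--     p = 2
--     while p * p <= n:
--         if n % p == 0:
--             e = 0
--             while n % p == 0:
--                 n //= p
--                 e += 1
--             factors.append((p, e))
--         p += 1
--     if n > 1:
--         factors.append((n, 1))
--     divs = [1]
--     for (p, e) in factors:
--         divs = [d * p ** k for d in divs for k in range(e + 1)]
--     s = math.isqrt(area)
--     w = max(d for d in divs if d <= s)
--     return [area // w, w]
-- ===== Notes on version B (the rewrite author's own statement) =====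
-- stated objective: alternative
-- what changed: Replaces A's exhaustive trial-division scan over all widths up to sqrt(area) with prime factorization of area, enumeration of its full divisor list from the factorization, and selection of the largest divisor not exceeding isqrt(area).
import Mathlib
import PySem

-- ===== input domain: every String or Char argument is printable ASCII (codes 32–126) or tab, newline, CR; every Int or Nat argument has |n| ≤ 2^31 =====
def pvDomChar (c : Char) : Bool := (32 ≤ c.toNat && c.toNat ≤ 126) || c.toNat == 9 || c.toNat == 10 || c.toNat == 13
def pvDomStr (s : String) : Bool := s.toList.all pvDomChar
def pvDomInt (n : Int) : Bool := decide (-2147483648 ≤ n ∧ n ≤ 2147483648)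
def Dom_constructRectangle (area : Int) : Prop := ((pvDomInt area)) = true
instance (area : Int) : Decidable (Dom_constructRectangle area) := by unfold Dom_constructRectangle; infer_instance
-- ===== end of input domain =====

-- B replaces A's full trial-division scan by prime factorization + enumeration of all
-- divisors, picking the largest divisor ≤ isqrt(area). Objective: alternative algorithm.

-- ===== PORT A =====
-- A's first line `if area<=2: res=[1,area]` is dead code: `res=[area,1]` unconditionally
-- overwrites it before any use, so it contributes nothing to the result.
-- int(math.sqrt(area)) = Nat.sqrt area.toNat exactly for 0 ≤ area ≤ 2^31 (double sqrt is
-- correctly rounded and the gap to the nearest integer root exceeds one ulp there).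
def constructRectangle (area : Int) : List Int :=
  (PySem.List.pyRange 2 ((Nat.sqrt area.toNat : Int) + 1) 1).foldl
    (fun res width =>
      if PySem.Int.mod area width = 0 then
        [max (PySem.Int.floordiv area width) width,
         min (PySem.Int.floordiv area width) width]
      else res)
    [area, 1]

-- ===== PORT B =====
-- inner `while n % p == 0: n //= p; e += 1` of Source B; the fuel argument only totalises the
-- loop (n.toNat steps always suffice: each pass divides n ≥ 1 by p ≥ 2)
def altStrip : Nat → Int → Int → Int → Int × Int
  | 0, n, _, e => (n, e)
  | fuel + 1, n, p, e =>
    if PySem.Int.mod n p = 0 then altStrip fuel (PySem.Int.floordiv n p) p (e + 1)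
    else (n, e)

-- outer `while p * p <= n` loop of Source B, collecting (prime, exponent) pairs; fuel-totalised
-- (n.toNat steps always suffice from the initial call with p = 2)
def altFact : Nat → Int → Int → List (Int × Int)
  | 0, n, _ => if 1 < n then [(n, 1)] else []
  | fuel + 1, n, p =>
    if p * p ≤ n then
      if PySem.Int.mod n p = 0 then
        (p, (altStrip n.toNat n p 0).2) :: altFact fuel (altStrip n.toNat n p 0).1 (p + 1)
      else altFact fuel n (p + 1)
    else if 1 < n then [(n, 1)] else []

-- one round of the divisor-list comprehension `[d * p**k for d in divs for k in range(e+1)]`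
def altStep (ds : List Int) (pe : Int × Int) : List Int :=
  ds.flatMap (fun d => (PySem.List.pyRange 0 (pe.2 + 1) 1).map (fun k => d * pe.1 ^ k.toNat))

-- math.isqrt area = Nat.sqrt area.toNat exactly (both are the floor integer square root);
-- `max(d for d in divs if d <= s)` is max? over the filtered list (never empty inside Pre_:
-- the .getD 1 totalises the port where Python's max would raise, which Pre_ excludes)
def constructRectangle_alt (area : Int) : List Int :=
  if area = 0 then [0, 1]
  else
    let factors := altFact area.toNat area 2
    let divs := factors.foldl altStep [1]
    let s : Int := (Nat.sqrt area.toNat : Int)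
    let w := (PySem.List.max? (divs.filter (fun d => d ≤ s)) (fun y => y)).getD 1
    [PySem.Int.floordiv area w, w]

-- ===== PRECONDITION & SPEC =====
-- math.sqrt (A) and math.isqrt (B) both raise ValueError on a negative argument
def Pre_constructRectangle (area : Int) : Prop := 0 ≤ area
instance (area : Int) : Decidable (Pre_constructRectangle area) := by
  unfold Pre_constructRectangle; infer_instance
def pvWitness_constructRectangle : Int := 12

def Spec_constructRectangle (area : Int) (out : List Int) : Prop := out = constructRectangle_alt area
instance (area : Int) (out : List Int) : Decidable (Spec_constructRectangle area out) := by unfold Spec_constructRectangle; infer_instance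

-- ===== CLAIM (what is proved, stated in full; the proofs are below) =====
def Claim_equal_constructRectangle : Prop := ∀ (area : Int), Dom_constructRectangle area → Pre_constructRectangle area → Spec_constructRectangle area (constructRectangle area)

-- ===== LEMMAS AND PROOFS =====

-- ---- A side: the upward overwrite loop computes the greatest divisor ≤ s ----

theorem foldA_eq (a : Int) (ha : 1 ≤ a) : ∀ s : Nat, 1 ≤ s → s ≤ Nat.sqrt a.toNat →
    (PySem.List.pyRange 2 ((s : Int) + 1) 1).foldl
      (fun res width =>
        if PySem.Int.mod a width = 0 then
          [max (PySem.Int.floordiv a width) width,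
           min (PySem.Int.floordiv a width) width]
        else res)
      [a, 1]
    = [PySem.Int.floordiv a ((Nat.findGreatest (fun d => d ∣ a.toNat) s : Nat) : Int),
       ((Nat.findGreatest (fun d => d ∣ a.toNat) s : Nat) : Int)] := by
  have ha' : ((a.toNat : Int)) = a := Int.toNat_of_nonneg (by omega)
  intro s
  induction s with
  | zero => intro h; omega
  | succ m ih =>
    intro _ hs
    match m, ih with
    | 0, _ =>
      rw [PySem.List.pyRange_one_eq_nil (by norm_num)]
      have h1 : Nat.findGreatest (fun d => d ∣ a.toNat) 1 = 1 := by
        simp [Nat.findGreatest]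
      have h2 : PySem.Int.floordiv a 1 = a := by
        rw [PySem.Int.floordiv_eq_ediv_of_pos (by norm_num), Int.ediv_one]
      rw [h1, List.foldl_nil]
      norm_num [h2]
    | (m + 1), ih =>
      have hsplit : PySem.List.pyRange 2 (((m + 2 : Nat) : Int) + 1) 1
          = PySem.List.pyRange 2 (((m + 1 : Nat) : Int) + 1) 1 ++ [((m + 2 : Nat) : Int)] := by
        have := PySem.List.pyRange_one_succ_right (a := 2) (b := ((m + 2 : Nat) : Int))
          (by push_cast; omega)
        push_cast at this ⊢
        convert this using 2
      rw [hsplit, List.foldl_append, ih (by omega) (by omega), List.foldl_cons, List.foldl_nil]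
      have hdvd_iff : PySem.Int.mod a ((m + 2 : Nat) : Int) = 0 ↔ (m + 2) ∣ a.toNat := by
        rw [PySem.Int.mod_eq_zero_iff_dvd]
        conv_lhs => rw [← ha']
        exact Int.natCast_dvd_natCast
      rw [Nat.findGreatest_succ (m + 1)]
      by_cases hd : (m + 2) ∣ a.toNat
      · rw [if_pos (hdvd_iff.2 hd), if_pos hd]
        have hxx : ((m + 2 : Nat) : Int) * ((m + 2 : Nat) : Int) ≤ a := by
          have h1 : (m + 2) * (m + 2) ≤ a.toNat := Nat.le_sqrt.mp hs
          have h2 := Int.ofNat_le.mpr h1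
          rw [ha'] at h2; push_cast at h2 ⊢; exact h2
        have hle : ((m + 2 : Nat) : Int) ≤ PySem.Int.floordiv a ((m + 2 : Nat) : Int) :=
          (PySem.Int.le_floordiv_iff_mul_le (by push_cast; omega)).2 hxx
        rw [max_eq_left hle, min_eq_right hle]
      · rw [if_neg (fun hc => hd (hdvd_iff.1 hc)), if_neg hd]

-- ---- B side helper lemmas ----

-- full behaviour of the inner strip loop, under adequate fuel
theorem altStrip_spec : ∀ (fuel : Nat) (n p e : Int), n.toNat ≤ fuel → 1 ≤ n → 2 ≤ p →
    ∃ (m : Int) (k : Nat), altStrip fuel n p e = (m, e + k) ∧ n = m * p ^ k ∧ 1 ≤ m ∧ ¬ p ∣ m := by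
  intro fuel
  induction fuel with
  | zero => intro n p e hN hn hp; omega
  | succ M ih =>
    intro n p e hN hn hp
    rw [altStrip]
    by_cases hd : PySem.Int.mod n p = 0
    · rw [if_pos hd]
      have hdvd : p ∣ n := (PySem.Int.mod_eq_zero_iff_dvd n p).1 hd
      have hfd : PySem.Int.floordiv n p = n / p :=
        PySem.Int.floordiv_eq_ediv_of_pos (by omega)
      have hqp : n / p * p = n := Int.ediv_mul_cancel hdvd
      have hq1 : 1 ≤ n / p := by
        by_contra hc
        nlinarith
      have hqlt : n / p < n := by nlinarith
      obtain ⟨m, k, heq, hprod, hm1, hnd⟩ := ih (n / p) p (e + 1) (by omega) hq1 hp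
      refine ⟨m, k + 1, ?_, ?_, hm1, hnd⟩
      · rw [hfd, heq]; congr 1; push_cast; ring
      · rw [pow_succ, ← mul_assoc, ← hprod, hqp]
    · rw [if_neg hd]
      exact ⟨n, 0, by simp, by simp, hn,
        fun hdd => hd ((PySem.Int.mod_eq_zero_iff_dvd n p).2 hdd)⟩

theorem mem_altStep (ds : List Int) (p e x : Int) (he : 0 ≤ e) :
    x ∈ altStep ds (p, e) ↔ ∃ d ∈ ds, ∃ k : Nat, k ≤ e.toNat ∧ x = d * p ^ k := by
  simp only [altStep, List.mem_flatMap, List.mem_map, PySem.List.mem_pyRange_one]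
  constructor
  · rintro ⟨d, hd, k, ⟨hk0, hk1⟩, rfl⟩
    exact ⟨d, hd, k.toNat, by omega, rfl⟩
  · rintro ⟨d, hd, k, hk, rfl⟩
    exact ⟨d, hd, (k : Int), ⟨by omega, by omega⟩, by rw [Int.toNat_natCast]⟩

-- a number with no divisor in [2, p) and below p² has only the divisors 1 and itself
theorem divisors_of_no_small (n p m : Int) (hn : 1 < n) (hp : 2 ≤ p)
    (hsmall : ∀ q : Int, 2 ≤ q → q < p → ¬ q ∣ n) (hlt : n < p * p)
    (hm : 1 ≤ m) (hd : m ∣ n) : m = 1 ∨ m = n := by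
  obtain ⟨c, hc⟩ := hd
  have hc1 : 1 ≤ c := by nlinarith
  by_cases hm1 : m = 1
  · exact Or.inl hm1
  by_cases hc1' : c = 1
  · right; rw [hc, hc1', mul_one]
  have hm2 : 2 ≤ m := by omega
  have hc2 : 2 ≤ c := by omega
  exfalso
  rcases le_total m c with hmc | hcm
  · exact hsmall m hm2 (by nlinarith) ⟨c, hc⟩
  · exact hsmall c hc2 (by nlinarith) ⟨m, by rw [hc]; ring⟩

-- the trial divisor p that hits (p ∣ n) while no q < p divides n is prime
theorem prime_of_no_small (n p : Int) (hp : 2 ≤ p) (_hn : 1 ≤ n) (hdvd : p ∣ n)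
    (hsmall : ∀ q : Int, 2 ≤ q → q < p → ¬ q ∣ n) : p.toNat.Prime := by
  rw [Nat.prime_def_lt]
  refine ⟨by omega, fun q hq hqd => ?_⟩
  by_contra hq1
  have hq0 : q ≠ 0 := by rintro rfl; simp at hqd; omega
  have hq2 : 2 ≤ q := by omega
  have hqd' : (q : Int) ∣ p := by
    have := Int.natCast_dvd_natCast.2 hqd
    rwa [Int.toNat_of_nonneg (by omega : (0:Int) ≤ p)] at this
  exact hsmall q (by omega) (by omega) (hqd'.trans hdvd)

-- decomposition of a divisor of m₀ * p^k for prime p (via ℕ)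
theorem dvd_mul_split (M m₀ p : Int) (k : Nat) (hM : 1 ≤ M) (hm₀ : 1 ≤ m₀) (hp : 2 ≤ p)
    (hprime : p.toNat.Prime) (hd : M ∣ m₀ * p ^ k) :
    ∃ (j : Nat) (m : Int), j ≤ k ∧ 1 ≤ m ∧ m ∣ m₀ ∧ M = m * p ^ j := by
  have hnat : M.natAbs ∣ m₀.natAbs * p.natAbs ^ k := by
    have := Int.natAbs_dvd_natAbs.2 hd
    rwa [Int.natAbs_mul, Int.natAbs_pow] at this
  obtain ⟨d₂, d₁, hd₂, hd₁, hMsplit⟩ := Nat.dvd_mul.1 hnat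
  have hpabs : p.natAbs = p.toNat := by omega
  rw [hpabs] at hd₁
  obtain ⟨j, hj, rfl⟩ := (Nat.dvd_prime_pow hprime).1 hd₁
  refine ⟨j, (d₂ : Int), hj, ?_, ?_, ?_⟩
  · have : d₂ ≠ 0 := by
      rintro rfl; simp at hMsplit; omega
    omega
  · have : (d₂ : Int) ∣ (m₀.natAbs : Int) := Int.natCast_dvd_natCast.2 hd₂
    rwa [Int.natAbs_of_nonneg (by omega)] at this
  · have hM' : (M.natAbs : Int) = M := Int.natAbs_of_nonneg (by omega)
    have hp' : ((p.toNat : Nat) : Int) = p := Int.toNat_of_nonneg (by omega)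
    rw [← hM', ← hMsplit]
    push_cast
    rw [hp']

-- loop exit of the factor loop (p² > n, or fuel 0 which forces p² > n in our uses):
-- the collected list is [] or [(n,1)], and the enumeration step yields all divisors
theorem altBase_mem (n p : Int) (hn0 : 1 ≤ n) (hp : 2 ≤ p)
    (hsmall : ∀ q : Int, 2 ≤ q → q < p → ¬ q ∣ n) (hlt : n < p * p) :
    ∀ (ds : List Int) (x : Int),
      x ∈ (if 1 < n then [(n, 1)] else []).foldl altStep ds
        ↔ ∃ d ∈ ds, ∃ m : Int, 1 ≤ m ∧ m ∣ n ∧ x = d * m := by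
  intro ds x
  by_cases h1 : 1 < n
  · rw [if_pos h1, List.foldl_cons, List.foldl_nil,
      mem_altStep ds n 1 x (by norm_num)]
    constructor
    · rintro ⟨d, hd, k, hk, rfl⟩
      rcases Nat.le_one_iff_eq_zero_or_eq_one.1 hk with rfl | rfl
      · exact ⟨d, hd, 1, le_refl 1, one_dvd n, by rw [pow_zero]⟩
      · exact ⟨d, hd, n, by omega, dvd_refl n, by rw [pow_one]⟩
    · rintro ⟨d, hd, m, hm1, hmd, rfl⟩
      rcases divisors_of_no_small n p m h1 hp hsmall hlt hm1 hmd with rfl | rfl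
      · exact ⟨d, hd, 0, by omega, by rw [pow_zero]⟩
      · exact ⟨d, hd, 1, by omega, by rw [pow_one]⟩
  · have hn1 : n = 1 := by omega
    subst hn1
    rw [if_neg (by omega), List.foldl_nil]
    constructor
    · intro hx; exact ⟨x, hx, 1, le_refl 1, one_dvd 1, (mul_one x).symm⟩
    · rintro ⟨d, hd, m, hm1, hmd, rfl⟩
      have : m = 1 := Int.eq_one_of_dvd_one (by omega) hmd
      subst this; rwa [mul_one]

-- main invariant of the factor loop + divisor enumeration, under adequate fuel
theorem altFact_mem_aux : ∀ (fuel : Nat) (n p : Int), n.toNat + 2 - p.toNat ≤ fuel →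
    1 ≤ n → 2 ≤ p → (∀ q : Int, 2 ≤ q → q < p → ¬ q ∣ n) →
    ∀ (ds : List Int) (x : Int),
      x ∈ (altFact fuel n p).foldl altStep ds ↔ ∃ d ∈ ds, ∃ m : Int, 1 ≤ m ∧ m ∣ n ∧ x = d * m := by
  intro fuel
  induction fuel with
  | zero =>
    intro n p hN hn hp hsmall
    have hlt : n < p * p := by
      by_contra hc
      have hle : p * p ≤ n := by omega
      have hpn : p ≤ n := by nlinarith
      omega
    rw [altFact]
    exact altBase_mem n p hn hp hsmall hlt
  | succ M ih =>
    intro n p hN hn hp hsmall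
    by_cases hle : p * p ≤ n
    · by_cases hd : PySem.Int.mod n p = 0
      · intro ds x
        have hdvd : p ∣ n := (PySem.Int.mod_eq_zero_iff_dvd n p).1 hd
        obtain ⟨m₀, k, heq, hprod, hm₀, hnd⟩ := altStrip_spec n.toNat n p 0 le_rfl hn hp
        have hk1 : 1 ≤ k := by
          rcases Nat.eq_zero_or_pos k with rfl | h
          · rw [pow_zero, mul_one] at hprod; exact absurd (hprod ▸ hdvd) hnd
          · exact h
        have hprime : p.toNat.Prime := prime_of_no_small n p hp hn hdvd hsmall
        have hm₀n : m₀ * p ≤ n := by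
          have h1 : p ^ 1 ≤ p ^ k := pow_le_pow_right₀ (by omega) hk1
          rw [pow_one] at h1; nlinarith
        have hsmall' : ∀ q : Int, 2 ≤ q → q < p + 1 → ¬ q ∣ m₀ := by
          intro q hq2 hqp hqd
          rcases lt_or_eq_of_le (by omega : q ≤ p) with h | rfl
          · exact hsmall q hq2 h (hqd.trans ⟨p ^ k, hprod⟩)
          · exact hnd hqd
        rw [altFact, if_pos hle, if_pos hd, heq, List.foldl_cons]
        have hkNat : ((0:Int) + (k:Int)).toNat = k := by omega
        have hIH := ih m₀ (p + 1) (by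
            have hpn : p ≤ n := by nlinarith
            have hm₀lt : m₀ < n := by nlinarith
            omega) hm₀ (by omega) hsmall' (altStep ds (p, 0 + (k:Int))) x
        rw [hIH]
        constructor
        · rintro ⟨d', hd', m, hm1, hmd, rfl⟩
          rw [mem_altStep ds p (0 + (k:Int)) d' (by omega)] at hd'
          obtain ⟨d, hd, j, hj, rfl⟩ := hd'
          rw [hkNat] at hj
          refine ⟨d, hd, m * p ^ j, ?_, ?_, by ring⟩
          · have : (1:Int) ≤ p ^ j := one_le_pow₀ (by omega)
            nlinarith
          · rw [hprod]
            exact mul_dvd_mul hmd (pow_dvd_pow p hj)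
        · rintro ⟨d, hd, M, hM1, hMd, rfl⟩
          rw [hprod] at hMd
          obtain ⟨j, m, hj, hm1, hmd, rfl⟩ := dvd_mul_split M m₀ p k hM1 hm₀ hp hprime hMd
          refine ⟨d * p ^ j, ?_, m, hm1, hmd, by ring⟩
          rw [mem_altStep ds p (0 + (k:Int)) _ (by omega), hkNat]
          exact ⟨d, hd, j, hj, rfl⟩
      · intro ds x
        rw [altFact, if_pos hle, if_neg hd]
        have hsmall' : ∀ q : Int, 2 ≤ q → q < p + 1 → ¬ q ∣ n := by
          intro q hq2 hqp hqd
          rcases lt_or_eq_of_le (by omega : q ≤ p) with h | rfl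
          · exact hsmall q hq2 h hqd
          · exact hd ((PySem.Int.mod_eq_zero_iff_dvd n q).2 hqd)
        have hpn : p ≤ n := by nlinarith
        exact ih n (p + 1) (by omega) hn (by omega) hsmall' ds x
    · rw [altFact, if_neg hle]
      exact altBase_mem n p hn hp hsmall (by omega)

-- divisor-list characterisation at the top-level call
theorem mem_divs (a : Int) (ha : 1 ≤ a) (x : Int) :
    x ∈ (altFact a.toNat a 2).foldl altStep [1] ↔ 1 ≤ x ∧ x ∣ a := by
  rw [altFact_mem_aux a.toNat a 2 (by omega) ha (by norm_num)
    (by intro q hq2 hq0; omega) [1] x]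
  constructor
  · rintro ⟨d, hd, m, hm1, hmd, rfl⟩
    simp only [List.mem_singleton] at hd
    subst hd; rw [one_mul]; exact ⟨hm1, hmd⟩
  · rintro ⟨hx1, hxd⟩
    exact ⟨1, List.mem_singleton_self 1, x, hx1, hxd, (one_mul x).symm⟩

-- ---- assembly ----

theorem main_eq (a : Int) (ha : 0 ≤ a) : constructRectangle a = constructRectangle_alt a := by
  by_cases h0 : a = 0
  · subst h0
    have hA : constructRectangle 0 = [0, 1] := by
      unfold constructRectangle
      rw [show ((Nat.sqrt (0:Int).toNat : Int) + 1) = 1 by norm_num,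
        PySem.List.pyRange_one_eq_nil (by norm_num), List.foldl_nil]
    have hB : constructRectangle_alt 0 = [0, 1] := by
      unfold constructRectangle_alt
      rw [if_pos rfl]
    rw [hA, hB]
  have ha1 : (1:Int) ≤ a := by omega
  have ha' : ((a.toNat : Int)) = a := Int.toNat_of_nonneg ha
  have hs1 : 1 ≤ Nat.sqrt a.toNat := Nat.sqrt_pos.2 (by omega)
  -- the greatest divisor ≤ isqrt(a), as a natural number
  set g : Nat := Nat.findGreatest (fun d => d ∣ a.toNat) (Nat.sqrt a.toNat) with hg
  have hg1 : 1 ≤ g := Nat.le_findGreatest (P := fun d => d ∣ a.toNat) (m := 1)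
    (n := a.toNat.sqrt) hs1 (one_dvd _)
  have hgd : g ∣ a.toNat := Nat.findGreatest_spec (P := fun d => d ∣ a.toNat) hs1 (one_dvd _)
  have hgs : g ≤ Nat.sqrt a.toNat := Nat.findGreatest_le _
  have hgdInt : (g : Int) ∣ a := by
    have := Int.natCast_dvd_natCast.2 hgd
    rwa [ha'] at this
  -- A's side
  have hA : constructRectangle a
      = [PySem.Int.floordiv a (g : Int), (g : Int)] := by
    unfold constructRectangle
    exact foldA_eq a ha1 (Nat.sqrt a.toNat) hs1 le_rfl
  -- B's side
  rw [hA]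
  unfold constructRectangle_alt
  rw [if_neg h0]
  simp only []
  -- name B's intermediate values
  have hgf : (g : Int) ∈ (((altFact a.toNat a 2).foldl altStep [1]).filter
      (fun d => d ≤ ((Nat.sqrt a.toNat : Nat) : Int))) := by
    rw [List.mem_filter]
    refine ⟨(mem_divs a ha1 _).2 ⟨by omega, hgdInt⟩, by simp; omega⟩
  rcases hmax : PySem.List.max? (((altFact a.toNat a 2).foldl altStep [1]).filter
      (fun d => d ≤ ((Nat.sqrt a.toNat : Nat) : Int))) (fun y => y) with _ | mx
  · exact absurd ((PySem.List.max?_eq_none_iff _ _).1 hmax ▸ hgf) (List.not_mem_nil)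
  · have hmx_mem := PySem.List.max?_mem hmax
    rw [List.mem_filter] at hmx_mem
    obtain ⟨hmx_divs, hmx_le⟩ := hmx_mem
    obtain ⟨hmx1, hmxd⟩ := (mem_divs a ha1 mx).1 hmx_divs
    have hmx_le' : mx ≤ ((Nat.sqrt a.toNat : Nat) : Int) := by simpa using hmx_le
    have h1 : (g : Int) ≤ mx := by
      simpa using PySem.List.max?_isMax hmax _ hgf
    have h2 : mx ≤ (g : Int) := by
      have hmxNat : mx.toNat ∣ a.toNat := by
        have : ((mx.toNat : Int)) = mx := Int.toNat_of_nonneg (by omega)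
        refine Int.natCast_dvd_natCast.1 ?_
        rw [this, ha']; exact hmxd
      have := Nat.le_findGreatest (P := fun d => d ∣ a.toNat) (m := mx.toNat)
        (n := a.toNat.sqrt) (by omega) hmxNat
      rw [← hg] at this; omega
    have : mx = (g : Int) := le_antisymm h2 h1
    rw [this]; simp

-- ===== VERDICT (by name: the statement is the Claim_ definition above) =====
theorem constructRectangle_spec : Claim_equal_constructRectangle := by
  intro area _ hpre
  unfold Spec_constructRectangle
  exact main_eq area hpre
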